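-- pv_equiv track=rewrite | github.com/Richielly/conversorFrotas | venvconversorfrotas/Validations/validationData.py | factory_entity
-- ===== SOURCE A (Python) =====
-- def factory_entity(table, *args):
--     entity = ""
--
--     for i, colum in enumerate(args[0], start=0):
--
--         if colum[1] == 'INTEGER':
--             if colum[4] == 'YES':
--                 entity = entity +'\n'+(f"        _entity['{colum[0]}']=type.to_integer(_column[{i}]) #obrigatorio")
--             else:
--                 entity = entity + '\n' + (f"        _entity['{colum[0]}']=type.to_integer(_column[{i}])")
--         elif colum[1] == 'VARCHAR':
--             if colum[4] == 'YES':
--                 entity = entity + '\n' + (f"        _entity['{colum[0]}']=type.to_string(_column[{i}]) #obrigatorio")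
--             else:
--                 entity = entity + '\n' + (f"        _entity['{colum[0]}']=type.to_string(_column[{i}])")
--
--         elif colum[1] == 'DATE':
--             if colum[4] == 'YES':
--                 entity = entity + '\n' + (f"        _entity['{colum[0]}']=type.string_to_date(_column[{i}]) #obrigatorio")
--             else:
--                 entity = entity + '\n' + (f"        _entity['{colum[0]}']=type.string_to_date(_column[{i}])")
--
--         elif colum[1] == 'TIMESTAMP':
--             if colum[4] == 'YES':
--                 entity = entity + '\n' + (f"        _entity['{colum[0]}']=type.string_to_datetime(_column[{i}]) #obrigatorio")
--             else:
--                 entity = entity + '\n' + (f"        _entity['{colum[0]}']=type.string_to_datetime(_column[{i}])")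
--     return entity
-- ===== SOURCE B (Python) =====
-- _CONV = {
--     'INTEGER': 'type.to_integer',
--     'VARCHAR': 'type.to_string',
--     'DATE': 'type.string_to_date',
--     'TIMESTAMP': 'type.string_to_datetime',
-- }
--
--
-- def factory_entity(table, *args):
--     # Recursive, back-to-front assembly: build the code for the tail of the
--     # column list first, then prepend this column's line (if its type is known).
--     def build(i, cols):
--         if not cols:
--             return ""
--         c, rest = cols[0], build(i + 1, cols[1:])
--         fn = _CONV.get(c[1])
--         if fn is None:
--             return rest
--         return ("\n        _entity['%s']=%s(_column[%d])%s"
--                 % (c[0], fn, i, " #obrigatorio" if c[4] == 'YES' else "")) + rest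
--
--     return build(0, list(args[0]))
-- ===== Notes on version B (the rewrite author's own statement) =====
-- stated objective: alternative
-- what changed: Replaces A's iterative accumulator with an 8-branch if/elif chain by a recursive helper that assembles the output back-to-front (tail built first, line prepended) and dispatches the converter name through a constant type->converter table.
import Mathlib
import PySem

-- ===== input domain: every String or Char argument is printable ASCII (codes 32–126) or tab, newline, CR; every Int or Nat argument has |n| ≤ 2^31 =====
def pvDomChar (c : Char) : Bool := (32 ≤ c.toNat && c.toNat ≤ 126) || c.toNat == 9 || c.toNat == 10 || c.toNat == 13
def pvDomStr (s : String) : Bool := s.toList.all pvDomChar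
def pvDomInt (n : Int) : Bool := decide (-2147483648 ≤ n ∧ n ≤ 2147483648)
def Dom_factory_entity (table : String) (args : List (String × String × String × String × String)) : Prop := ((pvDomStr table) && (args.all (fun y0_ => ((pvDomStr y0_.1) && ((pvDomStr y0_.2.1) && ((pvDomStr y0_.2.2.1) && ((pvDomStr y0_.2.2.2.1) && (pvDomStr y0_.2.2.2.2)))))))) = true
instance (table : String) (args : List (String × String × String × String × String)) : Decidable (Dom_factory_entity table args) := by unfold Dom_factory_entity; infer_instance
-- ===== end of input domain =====

-- B replaces A's iterative accumulator + 8-branch if/elif chain by a recursive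
-- helper assembling the output back-to-front with a constant type->converter table.

-- ===== PORT A =====
def factory_entity (table : String) (args : List (String × String × String × String × String)) : String :=
  (PySem.List.enumerate args 0).foldl (fun entity p =>
    let i := p.1
    let colum := p.2
    if colum.2.1 = "INTEGER" then
      if colum.2.2.2.2 = "YES" then
        entity ++ "\n" ++ ("        _entity['" ++ colum.1 ++ "']=type.to_integer(_column[" ++ PySem.Int.toStr i ++ "]) #obrigatorio")
      else
        entity ++ "\n" ++ ("        _entity['" ++ colum.1 ++ "']=type.to_integer(_column[" ++ PySem.Int.toStr i ++ "])")
    else if colum.2.1 = "VARCHAR" then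
      if colum.2.2.2.2 = "YES" then
        entity ++ "\n" ++ ("        _entity['" ++ colum.1 ++ "']=type.to_string(_column[" ++ PySem.Int.toStr i ++ "]) #obrigatorio")
      else
        entity ++ "\n" ++ ("        _entity['" ++ colum.1 ++ "']=type.to_string(_column[" ++ PySem.Int.toStr i ++ "])")
    else if colum.2.1 = "DATE" then
      if colum.2.2.2.2 = "YES" then
        entity ++ "\n" ++ ("        _entity['" ++ colum.1 ++ "']=type.string_to_date(_column[" ++ PySem.Int.toStr i ++ "]) #obrigatorio")
      else
        entity ++ "\n" ++ ("        _entity['" ++ colum.1 ++ "']=type.string_to_date(_column[" ++ PySem.Int.toStr i ++ "])")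
    else if colum.2.1 = "TIMESTAMP" then
      if colum.2.2.2.2 = "YES" then
        entity ++ "\n" ++ ("        _entity['" ++ colum.1 ++ "']=type.string_to_datetime(_column[" ++ PySem.Int.toStr i ++ "]) #obrigatorio")
      else
        entity ++ "\n" ++ ("        _entity['" ++ colum.1 ++ "']=type.string_to_datetime(_column[" ++ PySem.Int.toStr i ++ "])")
    else entity) ""

-- ===== PORT B =====
-- the module-level dict literal _CONV (a dict literal is the successive insertion of its pairs)
def pvConv : PySem.Dict String String :=
  ((((PySem.Dict.empty).insert "INTEGER" "type.to_integer").insert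
      "VARCHAR" "type.to_string").insert
      "DATE" "type.string_to_date").insert
      "TIMESTAMP" "type.string_to_datetime"

-- B's inner recursive helper `build`: the tail is built first, this column's
-- line (if its type is in the table) is prepended
def pvBuild (i : Int) (cols : List (String × String × String × String × String)) : String :=
  match cols with
  | [] => ""
  | c :: rest =>
    let r := pvBuild (i + 1) rest
    match pvConv.get? c.2.1 with
    | none => r
    | some fn =>
        ("\n        _entity['" ++ c.1 ++ "']=" ++ fn ++ "(_column[" ++ PySem.Int.toStr i ++ "])"
          ++ (if c.2.2.2.2 = "YES" then " #obrigatorio" else "")) ++ r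

def factory_entity_alt (table : String) (args : List (String × String × String × String × String)) : String :=
  pvBuild 0 args

-- ===== PRECONDITION & SPEC =====
def Spec_factory_entity (table : String) (args : List (String × String × String × String × String)) (out : String) : Prop := out = factory_entity_alt table args
instance (table : String) (args : List (String × String × String × String × String)) (out : String) : Decidable (Spec_factory_entity table args out) := by unfold Spec_factory_entity; infer_instance

-- ===== CLAIM (what is proved, stated in full; the proofs are below) =====
def Claim_equal_factory_entity : Prop := ∀ (table : String) (args : List (String × String × String × String × String)), Dom_factory_entity table args → Spec_factory_entity table args (factory_entity table args)

-- ===== LEMMAS AND PROOFS =====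

-- A's loop body, named for the proofs
def pvStepA (entity : String) (p : Int × (String × String × String × String × String)) : String :=
  let i := p.1
  let colum := p.2
  if colum.2.1 = "INTEGER" then
    if colum.2.2.2.2 = "YES" then
      entity ++ "\n" ++ ("        _entity['" ++ colum.1 ++ "']=type.to_integer(_column[" ++ PySem.Int.toStr i ++ "]) #obrigatorio")
    else
      entity ++ "\n" ++ ("        _entity['" ++ colum.1 ++ "']=type.to_integer(_column[" ++ PySem.Int.toStr i ++ "])")
  else if colum.2.1 = "VARCHAR" then
    if colum.2.2.2.2 = "YES" then
      entity ++ "\n" ++ ("        _entity['" ++ colum.1 ++ "']=type.to_string(_column[" ++ PySem.Int.toStr i ++ "]) #obrigatorio")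
    else
      entity ++ "\n" ++ ("        _entity['" ++ colum.1 ++ "']=type.to_string(_column[" ++ PySem.Int.toStr i ++ "])")
  else if colum.2.1 = "DATE" then
    if colum.2.2.2.2 = "YES" then
      entity ++ "\n" ++ ("        _entity['" ++ colum.1 ++ "']=type.string_to_date(_column[" ++ PySem.Int.toStr i ++ "]) #obrigatorio")
    else
      entity ++ "\n" ++ ("        _entity['" ++ colum.1 ++ "']=type.string_to_date(_column[" ++ PySem.Int.toStr i ++ "])")
  else if colum.2.1 = "TIMESTAMP" then
    if colum.2.2.2.2 = "YES" then
      entity ++ "\n" ++ ("        _entity['" ++ colum.1 ++ "']=type.string_to_datetime(_column[" ++ PySem.Int.toStr i ++ "]) #obrigatorio")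
    else
      entity ++ "\n" ++ ("        _entity['" ++ colum.1 ++ "']=type.string_to_datetime(_column[" ++ PySem.Int.toStr i ++ "])")
  else entity

-- the single line B would emit for one enumerated column (none = the skip)
def pvLine (p : Int × (String × String × String × String × String)) : Option String :=
  (pvConv.get? p.2.2.1).map (fun fn =>
    "\n        _entity['" ++ p.2.1 ++ "']=" ++ fn ++ "(_column[" ++ PySem.Int.toStr p.1 ++ "])"
      ++ (if p.2.2.2.2.2 = "YES" then " #obrigatorio" else ""))

theorem pv_get (t : String) :
    pvConv.get? t =
      if t = "INTEGER" then some "type.to_integer"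
      else if t = "VARCHAR" then some "type.to_string"
      else if t = "DATE" then some "type.string_to_date"
      else if t = "TIMESTAMP" then some "type.string_to_datetime"
      else none := by
  simp only [pvConv, PySem.Dict.get?_insert, PySem.Dict.get?_empty]
  split_ifs <;> simp_all

theorem pvStepA_eq (entity : String) (p : Int × (String × String × String × String × String)) :
    pvStepA entity p = entity ++ (pvLine p).getD "" := by
  obtain ⟨i, c0, c1, c2, c3, c4⟩ := p
  have l1 : ("\n        _entity['" : String) = "\n" ++ "        _entity['" := rfl
  have m1 : ("']=type.to_integer(_column[" : String) = "']=" ++ ("type.to_integer" ++ "(_column[") := rfl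
  have m2 : ("']=type.to_string(_column[" : String) = "']=" ++ ("type.to_string" ++ "(_column[") := rfl
  have m3 : ("']=type.string_to_date(_column[" : String) = "']=" ++ ("type.string_to_date" ++ "(_column[") := rfl
  have m4 : ("']=type.string_to_datetime(_column[" : String) = "']=" ++ ("type.string_to_datetime" ++ "(_column[") := rfl
  have e1 : ("]) #obrigatorio" : String) = "])" ++ " #obrigatorio" := rfl
  simp only [pvStepA, pvLine, pv_get]
  split_ifs <;>
    simp only [Option.map_some, Option.map_none, Option.getD_some, Option.getD_none, l1,
      m1, m2, m3, m4, e1, String.append_assoc, String.append_empty]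

theorem pvBuild_cons (i : Int) (c : String × String × String × String × String)
    (rest : List (String × String × String × String × String)) :
    pvBuild i (c :: rest) = (pvLine (i, c)).getD "" ++ pvBuild (i + 1) rest := by
  simp only [pvBuild, pvLine]
  cases h : pvConv.get? c.2.1 <;> simp

theorem pv_fold (cols : List (String × String × String × String × String)) (i : Int) (acc : String) :
    (PySem.List.enumerate cols i).foldl pvStepA acc = acc ++ pvBuild i cols := by
  induction cols generalizing i acc with
  | nil => simp [PySem.List.enumerate_nil, pvBuild]
  | cons c cs ih =>
    rw [PySem.List.enumerate_cons, List.foldl_cons, ih, pvStepA_eq, pvBuild_cons,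
      String.append_assoc]

-- ===== VERDICT (by name: the statement is the Claim_ definition above) =====
theorem factory_entity_spec : Claim_equal_factory_entity := by
  intro table args _
  show factory_entity table args = factory_entity_alt table args
  exact (pv_fold args 0 "").trans (by simp [factory_entity_alt])
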